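-- pv_equiv track=rewrite | github.com/RiTUAL-UH/DA_NER | src/commons/preproc_domain.py | unlinearize_sentence
-- ===== SOURCE A (Python) =====
-- def unlinearize_sentence(sentence):
--     tokens, labels = [], []
--     num_b_entity, num_i_entity = 0, 0
--
--     b_entity, i_entity, entity_type = False, False, None
--     for token in sentence:
--         if token.startswith('<START_') and token.endswith('>'):
--             b_entity, i_entity, entity_type = True, False, token[7:-1]
--             num_b_entity += 1
--         elif token.startswith('<END_') and token.endswith('>'):
--             b_entity, i_entity, entity_type = False, False, None
--             num_i_entity += 1
--         else:
--             tokens.append(token)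
--             if b_entity:
--                 labels.append('B-' + entity_type)
--                 b_entity, i_entity = False, True
--             elif i_entity:
--                 labels.append('I-' + entity_type)
--             else:
--                 labels.append('O')
--
--         if (num_b_entity > num_i_entity + 1) or (num_b_entity < num_i_entity):
--             return ([], [])
--
--     assert len(tokens) == len(labels), "tokens: {} {} \n labels: {} {}".format(len(tokens), tokens, len(labels), labels)
--
--     return (tokens, labels) if num_b_entity == num_i_entity else ([], [])
-- ===== SOURCE B (Python) =====
-- def unlinearize_sentence(sentence):
--     sentence = list(sentence)
--
--     def is_start(t):
--         return t.startswith('<START_') and t.endswith('>')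
--
--     def is_end(t):
--         return t.startswith('<END_') and t.endswith('>')
--
--     # Pass 1: validate bracketing with a single nesting depth.
--     depth = 0
--     for t in sentence:
--         if is_start(t):
--             depth += 1
--         elif is_end(t):
--             depth -= 1
--         if depth < 0 or depth > 1:
--             return ([], [])
--     if depth != 0:
--         return ([], [])
--
--     # Pass 2: build tokens and labels (input is known well-formed).
--     tokens, labels = [], []
--     state, etype = 'O', None
--     for t in sentence:
--         if is_start(t):
--             state, etype = 'B', t[7:-1]
--         elif is_end(t):
--             state, etype = 'O', None
--         else:
--             tokens.append(t)
--             if state == 'B':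
--                 labels.append('B-' + etype)
--                 state = 'I'
--             elif state == 'I':
--                 labels.append('I-' + etype)
--             else:
--                 labels.append('O')
--     return (tokens, labels)
-- ===== Notes on version B (the rewrite author's own statement) =====
-- stated objective: simpler
-- what changed: Replaced A's fused loop (two entity counters, two boolean flags, a mid-loop early return and a final counter comparison) by a validate-then-build two-pass structure: a first pass tracks a single nesting depth and rejects immediately, a second pass builds tokens/labels knowing the input is well-formed.
import Mathlib
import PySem

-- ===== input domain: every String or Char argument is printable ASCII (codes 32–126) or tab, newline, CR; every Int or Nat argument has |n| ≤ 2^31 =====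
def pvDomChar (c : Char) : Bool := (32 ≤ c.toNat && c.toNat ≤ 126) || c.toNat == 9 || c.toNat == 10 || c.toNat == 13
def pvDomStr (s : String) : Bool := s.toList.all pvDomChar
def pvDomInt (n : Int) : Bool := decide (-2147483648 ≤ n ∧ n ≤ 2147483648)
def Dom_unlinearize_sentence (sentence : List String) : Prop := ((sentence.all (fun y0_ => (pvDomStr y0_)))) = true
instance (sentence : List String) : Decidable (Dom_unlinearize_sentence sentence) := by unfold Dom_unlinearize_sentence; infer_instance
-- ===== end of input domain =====

-- B replaces A's fused loop (counters + flags + mid-loop early return) by a validate-then-build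
-- two-pass structure over the same sentence; objective: simpler.


-- ===== PORT A =====
-- A's loop: state = (tokens, labels, num_b_entity, num_i_entity, b_entity, i_entity, entity_type).
-- entity_type is Option String (Python None); in A the '+' on entity_type is only reached with it set,
-- so `.getD ""` is never the taken branch on A's reachable states.
def unlinearize_sentence.go : List String → List String → List String → Int → Int → Bool → Bool → Option String → List String × List String
  | [], tokens, labels, nb, ni, _, _, _ =>
      if nb = ni then (tokens, labels) else ([], [])
  | t :: rest, tokens, labels, nb, ni, b, i, etype =>
      if PySem.Str.startswith t "<START_" && PySem.Str.endswith t ">" then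
        let nb := nb + 1
        if nb > ni + 1 ∨ nb < ni then ([], [])
        else unlinearize_sentence.go rest tokens labels nb ni true false (some (PySem.Str.slice t (some 7) (some (-1))))
      else if PySem.Str.startswith t "<END_" && PySem.Str.endswith t ">" then
        let ni := ni + 1
        if nb > ni + 1 ∨ nb < ni then ([], [])
        else unlinearize_sentence.go rest tokens labels nb ni false false none
      else
        let tokens := tokens ++ [t]
        let labels := labels ++ [if b then "B-" ++ etype.getD "" else if i then "I-" ++ etype.getD "" else "O"]
        let bi : Bool × Bool := if b then (false, true) else (b, i)
        if nb > ni + 1 ∨ nb < ni then ([], [])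
        else unlinearize_sentence.go rest tokens labels nb ni bi.1 bi.2 etype

def unlinearize_sentence (sentence : List String) : List String × List String :=
  unlinearize_sentence.go sentence [] [] 0 0 false false none

-- ===== PORT B =====
def unlinearize_sentence_alt.isStart (t : String) : Bool :=
  PySem.Str.startswith t "<START_" && PySem.Str.endswith t ">"

def unlinearize_sentence_alt.isEnd (t : String) : Bool :=
  PySem.Str.startswith t "<END_" && PySem.Str.endswith t ">"

-- Pass 1: validity of the bracketing, tracking one nesting depth.
def unlinearize_sentence_alt.valid : List String → Int → Bool
  | [], d => d == 0
  | t :: rest, d =>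
      let d := if unlinearize_sentence_alt.isStart t then d + 1
               else if unlinearize_sentence_alt.isEnd t then d - 1
               else d
      if d < 0 ∨ d > 1 then false else unlinearize_sentence_alt.valid rest d

-- Pass 2: build tokens and labels; state is the Python string 'O'/'B'/'I'.
def unlinearize_sentence_alt.build : List String → List String → List String → String → Option String → List String × List String
  | [], tokens, labels, _, _ => (tokens, labels)
  | t :: rest, tokens, labels, state, etype =>
      if unlinearize_sentence_alt.isStart t then
        unlinearize_sentence_alt.build rest tokens labels "B" (some (PySem.Str.slice t (some 7) (some (-1))))
      else if unlinearize_sentence_alt.isEnd t then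
        unlinearize_sentence_alt.build rest tokens labels "O" none
      else
        let tokens := tokens ++ [t]
        if state == "B" then
          unlinearize_sentence_alt.build rest tokens (labels ++ ["B-" ++ etype.getD ""]) "I" etype
        else if state == "I" then
          unlinearize_sentence_alt.build rest tokens (labels ++ ["I-" ++ etype.getD ""]) state etype
        else
          unlinearize_sentence_alt.build rest tokens (labels ++ ["O"]) state etype

def unlinearize_sentence_alt (sentence : List String) : List String × List String :=
  if unlinearize_sentence_alt.valid sentence 0 then
    unlinearize_sentence_alt.build sentence [] [] "O" none
  else ([], [])

-- ===== PRECONDITION & SPEC =====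
def Spec_unlinearize_sentence (sentence : List String) (out : List String × List String) : Prop := out = unlinearize_sentence_alt sentence
instance (sentence : List String) (out : List String × List String) : Decidable (Spec_unlinearize_sentence sentence out) := by unfold Spec_unlinearize_sentence; infer_instance

-- ===== CLAIM (what is proved, stated in full; the proofs are below) =====
def Claim_equal_unlinearize_sentence : Prop := ∀ (sentence : List String), Dom_unlinearize_sentence sentence → Spec_unlinearize_sentence sentence (unlinearize_sentence sentence)

-- ===== LEMMAS AND PROOFS =====

-- One-step unfolding lemmas (definitional) used to drive the induction without
-- letting simp normalize the string predicates away.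
lemma goA_cons (t : String) (rest tokens labels : List String) (nb ni : Int) (b i : Bool) (etype : Option String) :
    unlinearize_sentence.go (t :: rest) tokens labels nb ni b i etype =
      (if unlinearize_sentence_alt.isStart t then
        (if nb + 1 > ni + 1 ∨ nb + 1 < ni then ([], [])
         else unlinearize_sentence.go rest tokens labels (nb + 1) ni true false
                (some (PySem.Str.slice t (some 7) (some (-1)))))
      else if unlinearize_sentence_alt.isEnd t then
        (if nb > ni + 1 + 1 ∨ nb < ni + 1 then ([], [])
         else unlinearize_sentence.go rest tokens labels nb (ni + 1) false false none)
      else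
        (if nb > ni + 1 ∨ nb < ni then ([], [])
         else unlinearize_sentence.go rest (tokens ++ [t])
                (labels ++ [if b then "B-" ++ etype.getD "" else if i then "I-" ++ etype.getD "" else "O"])
                nb ni (if b then (false, true) else (b, i)).1 (if b then (false, true) else (b, i)).2 etype)) := rfl

lemma valid_cons (t : String) (rest : List String) (d : Int) :
    unlinearize_sentence_alt.valid (t :: rest) d =
      (let d' := if unlinearize_sentence_alt.isStart t then d + 1
                 else if unlinearize_sentence_alt.isEnd t then d - 1 else d
       if d' < 0 ∨ d' > 1 then false else unlinearize_sentence_alt.valid rest d') := rfl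

lemma build_cons (t : String) (rest tokens labels : List String) (state : String) (etype : Option String) :
    unlinearize_sentence_alt.build (t :: rest) tokens labels state etype =
      (if unlinearize_sentence_alt.isStart t then
        unlinearize_sentence_alt.build rest tokens labels "B" (some (PySem.Str.slice t (some 7) (some (-1))))
      else if unlinearize_sentence_alt.isEnd t then
        unlinearize_sentence_alt.build rest tokens labels "O" none
      else
        (if state == "B" then
          unlinearize_sentence_alt.build rest (tokens ++ [t]) (labels ++ ["B-" ++ etype.getD ""]) "I" etype
        else if state == "I" then
          unlinearize_sentence_alt.build rest (tokens ++ [t]) (labels ++ ["I-" ++ etype.getD ""]) state etype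
        else
          unlinearize_sentence_alt.build rest (tokens ++ [t]) (labels ++ ["O"]) state etype)) := rfl

-- Invariant relating A's loop state to B's two passes:
-- depth (nb - ni) is 1 inside an entity (b ∨ i), 0 outside; b and i are never both set;
-- A's remaining loop equals "validate the rest from this depth, then build the rest from the matching state".
lemma goA_eq (s : List String) : ∀ (tokens labels : List String) (nb ni : Int) (b i : Bool) (etype : Option String),
    ¬(b = true ∧ i = true) →
    nb - ni = (if b || i then 1 else 0) →
    unlinearize_sentence.go s tokens labels nb ni b i etype =
      (if unlinearize_sentence_alt.valid s (if b || i then 1 else 0) then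
        unlinearize_sentence_alt.build s tokens labels (if b then "B" else if i then "I" else "O") etype
      else ([], [])) := by
  induction s with
  | nil =>
      intro tokens labels nb ni b i etype hbi hd
      by_cases hin : (b || i) = true
      · simp only [hin, if_true] at hd ⊢
        have hne : nb ≠ ni := by omega
        simp only [unlinearize_sentence.go, unlinearize_sentence_alt.valid, if_neg hne]
        norm_num
      · have hb : b = false := by cases b <;> simp_all
        have hi : i = false := by cases i <;> simp_all
        subst hb; subst hi
        simp only [Bool.or_self, Bool.false_eq_true, if_false] at hd ⊢
        have heq : nb = ni := by omega
        simp only [unlinearize_sentence.go, unlinearize_sentence_alt.valid,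
          unlinearize_sentence_alt.build, if_pos heq]
        norm_num
  | cons t rest ih =>
      intro tokens labels nb ni b i etype hbi hd
      by_cases hS : unlinearize_sentence_alt.isStart t = true
      · -- START token
        by_cases hin : (b || i) = true
        · -- already inside an entity: depth becomes 2, both sides reject
          simp only [hin, if_true] at hd
          rw [goA_cons, valid_cons]
          simp only [hS, if_true, hin]
          rw [if_pos (show nb + 1 > ni + 1 ∨ nb + 1 < ni by left; omega)]
          norm_num
        · have hb : b = false := by cases b <;> simp_all
          have hi : i = false := by cases i <;> simp_all
          subst hb; subst hi
          simp only [Bool.or_self, Bool.false_eq_true, if_false] at hd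
          rw [goA_cons, valid_cons, build_cons]
          simp only [hS, if_true, Bool.or_self, Bool.false_eq_true, if_false]
          rw [if_neg (show ¬(nb + 1 > ni + 1 ∨ nb + 1 < ni) by omega)]
          rw [ih tokens labels (nb + 1) ni true false _ (by simp) (by simp; omega)]
          norm_num
      · rw [Bool.not_eq_true] at hS
        by_cases hE : unlinearize_sentence_alt.isEnd t = true
        · -- END token
          by_cases hin : (b || i) = true
          · simp only [hin, if_true] at hd
            rw [goA_cons, valid_cons, build_cons]
            simp only [hS, hE, Bool.false_eq_true, if_false, if_true, hin]
            rw [if_neg (show ¬(nb > ni + 1 + 1 ∨ nb < ni + 1) by omega)]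
            rw [ih tokens labels nb (ni + 1) false false none (by simp) (by simp; omega)]
            norm_num
          · have hb : b = false := by cases b <;> simp_all
            have hi : i = false := by cases i <;> simp_all
            subst hb; subst hi
            simp only [Bool.or_self, Bool.false_eq_true, if_false] at hd
            rw [goA_cons, valid_cons]
            simp only [hS, hE, Bool.false_eq_true, if_false, if_true]
            rw [if_pos (show nb > ni + 1 + 1 ∨ nb < ni + 1 by right; omega)]
            norm_num
        · -- plain token
          rw [Bool.not_eq_true] at hE
          rw [goA_cons, valid_cons, build_cons]
          simp only [hS, hE, Bool.false_eq_true, if_false]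
          rcases hcb : b with _ | _ <;> subst hcb
          · rcases hci : i with _ | _ <;> subst hci
            · -- outside an entity: label "O"
              have hd0 : nb - ni = 0 := by simpa using hd
              rw [if_neg (show ¬(nb > ni + 1 ∨ nb < ni) by omega)]
              norm_num
              rw [ih (tokens ++ [t]) (labels ++ ["O"]) nb ni false false etype (by simp) (by simpa using hd0)]
              simp
            · -- inside, I state
              have hd1 : nb - ni = 1 := by simpa using hd
              rw [if_neg (show ¬(nb > ni + 1 ∨ nb < ni) by omega)]
              norm_num
              rw [ih (tokens ++ [t]) (labels ++ ["I-" ++ etype.getD ""]) nb ni false true etype (by simp) (by simpa using hd1)]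
              simp
          · -- b = true: label "B-", switch to I
            have hib : i = false := by cases i <;> simp_all
            subst hib
            have hd1 : nb - ni = 1 := by simpa using hd
            rw [if_neg (show ¬(nb > ni + 1 ∨ nb < ni) by omega)]
            norm_num
            rw [ih (tokens ++ [t]) (labels ++ ["B-" ++ etype.getD ""]) nb ni false true etype (by simp) (by simpa using hd1)]
            simp

-- ===== VERDICT (by name: the statement is the Claim_ definition above) =====
theorem unlinearize_sentence_spec : Claim_equal_unlinearize_sentence := by
  intro sentence _
  unfold Spec_unlinearize_sentence unlinearize_sentence unlinearize_sentence_alt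
  have := goA_eq sentence [] [] 0 0 false false none (by simp) (by simp)
  simpa using this
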